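-- pv_equiv track=rewrite | github.com/kenlacroix/InsightVault | user_profile_manager.py | _prioritize_by_focus_areas
-- ===== SOURCE A (Python) =====
-- from typing import Dict, List, Optional, Any, Tuple
--
-- def _prioritize_by_focus_areas(key_learnings: List[str],
--                               focus_areas: List[str]) -> List[str]:
--     """Prioritize key learnings based on focus areas"""
--     if not focus_areas:
--         return key_learnings
--
--     # Simple prioritization: move focus area related learnings to front
--     prioritized = []
--     others = []
--
--     for learning in key_learnings:
--         if any(area.lower() in learning.lower() for area in focus_areas):
--             prioritized.append(learning)
--         else:
--             others.append(learning)
--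
--     return prioritized + others
-- ===== SOURCE B (Python) =====
-- def _prioritize_by_focus_areas(key_learnings, focus_areas):
--     """Prioritize key learnings based on focus areas"""
--     if not focus_areas:
--         return key_learnings
--     # stable sort: matched learnings (key False) come first, each group in original order
--     return sorted(
--         key_learnings,
--         key=lambda learning: not any(area.lower() in learning.lower() for area in focus_areas),
--     )
-- ===== Notes on version B (the rewrite author's own statement) =====
-- stated objective: alternative
-- what changed: Replaced the two-accumulator partition loop by a single stable sort keyed on the boolean non-match flag (False sorts before True), so the partition-and-concatenate result is produced by sorted() instead of explicit list building.
import Mathlib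
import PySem

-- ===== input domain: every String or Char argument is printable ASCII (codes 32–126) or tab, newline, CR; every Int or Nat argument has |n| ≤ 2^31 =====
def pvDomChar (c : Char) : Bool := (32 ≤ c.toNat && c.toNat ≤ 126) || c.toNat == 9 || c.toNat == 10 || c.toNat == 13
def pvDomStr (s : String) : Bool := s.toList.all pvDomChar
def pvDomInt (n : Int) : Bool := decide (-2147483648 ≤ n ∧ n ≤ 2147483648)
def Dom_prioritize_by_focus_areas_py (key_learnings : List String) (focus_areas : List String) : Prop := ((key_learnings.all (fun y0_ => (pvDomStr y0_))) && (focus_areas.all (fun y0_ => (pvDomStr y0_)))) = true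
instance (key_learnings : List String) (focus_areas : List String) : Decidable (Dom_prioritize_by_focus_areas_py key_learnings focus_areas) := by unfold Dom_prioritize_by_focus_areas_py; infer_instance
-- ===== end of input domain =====

-- B replaces A's two-accumulator partition loop by one stable sort on the boolean
-- non-match key (alternative decomposition; same values, no speed claim).


-- ===== PORT A =====
def prioritize_by_focus_areas_py (key_learnings : List String) (focus_areas : List String) : List String :=
  if focus_areas = [] then key_learnings
  else
    let p := key_learnings.foldl
      (fun (acc : List String × List String) learning =>
        if focus_areas.any (fun area => PySem.Str.isIn (PySem.Str.lower area) (PySem.Str.lower learning))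
        then (acc.1 ++ [learning], acc.2)
        else (acc.1, acc.2 ++ [learning]))
      ([], [])
    p.1 ++ p.2

-- ===== PORT B =====
def prioritize_by_focus_areas_py_alt (key_learnings : List String) (focus_areas : List String) : List String :=
  if focus_areas = [] then key_learnings
  else
    PySem.List.sorted key_learnings
      (fun learning => !(focus_areas.any (fun area => PySem.Str.isIn (PySem.Str.lower area) (PySem.Str.lower learning))))

-- ===== PRECONDITION & SPEC =====
def Spec_prioritize_by_focus_areas_py (key_learnings : List String) (focus_areas : List String) (out : List String) : Prop := out = prioritize_by_focus_areas_py_alt key_learnings focus_areas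
instance (key_learnings : List String) (focus_areas : List String) (out : List String) : Decidable (Spec_prioritize_by_focus_areas_py key_learnings focus_areas out) := by unfold Spec_prioritize_by_focus_areas_py; infer_instance

-- ===== CLAIM (what is proved, stated in full; the proofs are below) =====
def Claim_equal_prioritize_by_focus_areas_py : Prop := ∀ (key_learnings : List String) (focus_areas : List String), Dom_prioritize_by_focus_areas_py key_learnings focus_areas → Spec_prioritize_by_focus_areas_py key_learnings focus_areas (prioritize_by_focus_areas_py key_learnings focus_areas)

-- ===== LEMMAS AND PROOFS =====

-- inserting an all-false-preceding element at the head of an all-true list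
theorem pv_insert_false_all_true {α : Type} (key : α → Bool) (x : α) (T : List α)
    (hx : key x = false) (hT : ∀ y ∈ T, key y = true) :
    PySem.List.insertBy (fun a b => decide (key a < key b)) x T = x :: T := by
  cases T with
  | nil => rfl
  | cons t ts =>
      have ht : key t = true := hT t (by simp)
      simp [PySem.List.insertBy, hx, ht]

-- insertion into a false-block ++ true-block list
theorem pv_insert_blocks {α : Type} (key : α → Bool) (x : α) (F T : List α)
    (hF : ∀ y ∈ F, key y = false) (hT : ∀ y ∈ T, key y = true) :
    PySem.List.insertBy (fun a b => decide (key a < key b)) x (F ++ T) =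
      if key x then (F ++ T) ++ [x] else F ++ x :: T := by
  by_cases hx : key x = true
  · rw [PySem.List.insertBy_of_forall_not_before]
    · simp [hx]
    · intro y _; simp [hx]
  · have hx' : key x = false := by simpa using hx
    induction F with
    | nil => simpa [hx'] using pv_insert_false_all_true key x T hx' hT
    | cons a F' ih =>
        have ha : key a = false := hF a (by simp)
        have ih' := ih (fun y hy => hF y (by simp [hy]))
        simp [PySem.List.insertBy, ha, hx'] at ih' ⊢
        exact ih'

-- the insertion-sort fold over a boolean key keeps a false-block ++ true-block shape
theorem pv_fold_blocks {α : Type} (key : α → Bool) (xs : List α) :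
    ∀ (F T : List α), (∀ y ∈ F, key y = false) → (∀ y ∈ T, key y = true) →
      xs.foldl (fun acc x => PySem.List.insertBy (fun a b => decide (key a < key b)) x acc) (F ++ T) =
        (F ++ xs.filter (fun x => key x = false)) ++ (T ++ xs.filter (fun x => key x = true)) := by
  induction xs with
  | nil => intro F T _ _; simp
  | cons x xs ih =>
      intro F T hF hT
      rw [List.foldl_cons, pv_insert_blocks key x F T hF hT]
      by_cases hx : key x = true
      · rw [if_pos hx, List.append_assoc F T [x], ih F (T ++ [x]) hF
            (by intro y hy; rcases List.mem_append.1 hy with h | h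
                · exact hT y h
                · simp at h; subst h; exact hx)]
        simp [hx]
      · have hx' : key x = false := by simpa using hx
        rw [if_neg hx, show F ++ x :: T = (F ++ [x]) ++ T by simp, ih (F ++ [x]) T
            (by intro y hy; rcases List.mem_append.1 hy with h | h
                · exact hF y h
                · simp at h; subst h; exact hx') hT]
        simp [hx']

-- stable sort on a boolean key is the partition: false keys first, true keys after
theorem pv_sorted_bool_key {α : Type} (key : α → Bool) (xs : List α) :
    PySem.List.sorted xs key =
      xs.filter (fun x => key x = false) ++ xs.filter (fun x => key x = true) := by
  rw [PySem.List.sorted_eq_foldl_insertBy]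
  simpa using pv_fold_blocks key xs [] [] (by simp) (by simp)

-- A's two-accumulator loop is the filter pair
theorem pv_foldA_filter (key : String → Bool) (xs : List String) :
    ∀ (P O : List String),
      xs.foldl (fun (acc : List String × List String) learning =>
          if key learning then (acc.1 ++ [learning], acc.2) else (acc.1, acc.2 ++ [learning])) (P, O) =
        (P ++ xs.filter (fun x => key x = true), O ++ xs.filter (fun x => key x = false)) := by
  induction xs with
  | nil => intro P O; simp
  | cons x xs ih =>
      intro P O
      by_cases hx : key x = true
      · simp [List.foldl_cons, hx, ih]
      · have hx' : key x = false := by simpa using hx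
        simp [List.foldl_cons, hx', ih]

-- ===== VERDICT (by name: the statement is the Claim_ definition above) =====
theorem prioritize_by_focus_areas_py_spec : Claim_equal_prioritize_by_focus_areas_py := by
  intro kl fa _
  unfold Spec_prioritize_by_focus_areas_py prioritize_by_focus_areas_py prioritize_by_focus_areas_py_alt
  by_cases hfa : fa = []
  · simp [hfa]
  · rw [if_neg hfa, if_neg hfa]
    set key := fun learning =>
      fa.any (fun area => PySem.Str.isIn (PySem.Str.lower area) (PySem.Str.lower learning)) with hkey
    rw [pv_sorted_bool_key (fun l => !(key l)) kl, pv_foldA_filter key kl [] []]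
    simp only [List.nil_append]
    congr 1
    · apply List.filter_congr; intro x _; cases key x <;> rfl
    · apply List.filter_congr; intro x _; cases key x <;> rfl
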